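-- pv_equiv track=rewrite | github.com/JoshuaShinkle/COS-120 | LABTESTS/LABTEST1/LT01.py | elongatedVowels
-- ===== SOURCE A (Python) =====
-- def elongatedVowels(string):
--     newString = ""
--     for i in string:
--         if i == "a" or i == "e" or i == "i" or i == "o" or i == "u":
--             newString += i * 5
--         elif i == "A" or i == "E" or i == "I" or i == "O" or i == "U":
--             newString += i * 5
--         else:
--             newString += i
--     return newString
-- ===== SOURCE B (Python) =====
-- def elongatedVowels(string):
--     # staged passes: one whole-string replace per vowel instead of a per-character loop
--     for v in "aeiouAEIOU":
--         string = string.replace(v, v * 5)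
--     return string
-- ===== Notes on version B (the rewrite author's own statement) =====
-- stated objective: faster
-- what changed: Replaces A's per-character if/elif loop that accumulates a string by concatenation with ten staged whole-string str.replace passes, one per vowel; correct because each replacement contains only copies of its own vowel, so later passes never touch earlier expansions.
import Mathlib
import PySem

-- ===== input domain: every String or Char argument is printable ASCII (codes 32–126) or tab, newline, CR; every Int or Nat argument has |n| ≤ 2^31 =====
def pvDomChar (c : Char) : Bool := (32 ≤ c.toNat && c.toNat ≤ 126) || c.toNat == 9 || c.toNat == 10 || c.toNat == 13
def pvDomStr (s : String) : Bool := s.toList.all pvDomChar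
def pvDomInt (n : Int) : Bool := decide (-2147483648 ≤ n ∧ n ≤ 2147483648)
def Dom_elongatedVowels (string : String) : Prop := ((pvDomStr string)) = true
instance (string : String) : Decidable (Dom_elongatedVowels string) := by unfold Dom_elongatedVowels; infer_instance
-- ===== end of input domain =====

-- B replaces A's single per-character if/elif loop by ten staged whole-string replace passes, one per vowel (alternative decomposition).


-- ===== PORT A =====
-- literal transliteration: fold over the characters, appending to the accumulator string
def elongatedVowels (string : String) : String :=
  string.toList.foldl (fun newString i =>
    if i = 'a' ∨ i = 'e' ∨ i = 'i' ∨ i = 'o' ∨ i = 'u' then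
      newString ++ String.ofList (List.replicate 5 i)
    else if i = 'A' ∨ i = 'E' ∨ i = 'I' ∨ i = 'O' ∨ i = 'U' then
      newString ++ String.ofList (List.replicate 5 i)
    else
      newString ++ String.ofList [i]) ""

-- ===== PORT B =====
-- staged passes: for v in "aeiouAEIOU": string = string.replace(v, v * 5)
def elongatedVowels_alt (string : String) : String :=
  "aeiouAEIOU".toList.foldl (fun s v =>
    PySem.Str.replace s (String.ofList [v]) (String.ofList (List.replicate 5 v))) string

-- ===== PRECONDITION & SPEC =====
def Spec_elongatedVowels (string : String) (out : String) : Prop := out = elongatedVowels_alt string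
instance (string : String) (out : String) : Decidable (Spec_elongatedVowels string out) := by unfold Spec_elongatedVowels; infer_instance

-- ===== CLAIM =====
def Claim_equal_elongatedVowels : Prop := ∀ (string : String), Dom_elongatedVowels string → Spec_elongatedVowels string (elongatedVowels string)

-- ===== LEMMAS AND PROOFS =====

-- expand V l : every character of l that is in V becomes five copies of itself
def pvExpand (V : List Char) (l : List Char) : List Char :=
  l.flatMap (fun c => if c ∈ V then List.replicate 5 c else [c])

-- single-char replace is a flatMap
theorem pvGoSingle (v : Char) (new : List Char) :
    ∀ (fuel : Nat) (l acc : List Char), l.length ≤ fuel →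
      PySem.Chars.replace.go [v] new fuel l acc
        = acc.reverse ++ l.flatMap (fun c => if c = v then new else [c]) := by
  intro fuel
  induction fuel with
  | zero =>
      intro l acc h
      have : l = [] := List.eq_nil_of_length_eq_zero (Nat.le_zero.mp h)
      subst this; simp [PySem.Chars.replace.go]
  | succ n ih =>
      intro l acc h
      cases l with
      | nil => simp [PySem.Chars.replace.go]
      | cons c t =>
          simp only [PySem.Chars.replace.go]
          by_cases hc : c = v
          · subst hc
            have hp : List.isPrefixOf [c] (c :: t) = true := by simp [List.isPrefixOf]
            rw [if_pos hp]
            simp only [List.length, List.drop_succ_cons, List.drop_zero]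
            rw [ih t _ (by simpa using Nat.le_of_succ_le_succ h)]
            simp [List.flatMap_cons]
          · have hp : List.isPrefixOf [v] (c :: t) = false := by
              simp [List.isPrefixOf]; exact fun h' => hc h'.symm
            rw [if_neg (by simp [hp])]
            rw [ih t _ (by simpa using Nat.le_of_succ_le_succ h)]
            simp [List.flatMap_cons, hc]

theorem pvReplaceSingle (l : List Char) (v : Char) (new : List Char) :
    PySem.Chars.replace l [v] new = l.flatMap (fun c => if c = v then new else [c]) := by
  unfold PySem.Chars.replace
  rw [if_neg (by simp)]
  exact pvGoSingle v new l.length l [] (le_refl _)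

-- one staged pass extends the processed-vowel set
theorem pvStepExpand (V : List Char) (l : List Char) (v : Char) (hv : v ∉ V) :
    (pvExpand V l).flatMap (fun c => if c = v then List.replicate 5 v else [c])
      = pvExpand (V ++ [v]) l := by
  unfold pvExpand
  induction l with
  | nil => simp
  | cons c t ih =>
      simp only [List.flatMap_cons, List.flatMap_append]
      rw [ih]
      by_cases hc : c ∈ V
      · have hcv : ¬ c = v := fun h => hv (h ▸ hc)
        have hm : c ∈ V ++ [v] := List.mem_append_left _ hc
        rw [if_pos hc, if_pos hm]
        simp [List.replicate_succ, List.flatMap_cons, hcv]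
      · rw [if_neg hc]
        simp only [List.flatMap_cons, List.flatMap_nil, List.append_nil]
        by_cases hcv : c = v
        · subst hcv
          have hm : c ∈ V ++ [c] := by simp
          rw [if_pos rfl, if_pos hm]
        · have hm : c ∉ V ++ [v] := by simp [hc, hcv]
          rw [if_neg hcv, if_neg hm]

-- B's staged passes, folded over a list of fresh distinct vowels
theorem pvFoldB (vs : List Char) : ∀ (V : List Char) (l : List Char),
    (∀ x ∈ vs, x ∉ V) → vs.Nodup →
    vs.foldl (fun s v =>
        PySem.Str.replace s (String.ofList [v]) (String.ofList (List.replicate 5 v)))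
      (String.ofList (pvExpand V l))
      = String.ofList (pvExpand (V ++ vs) l) := by
  induction vs with
  | nil => intro V l _ _; simp
  | cons v t ih =>
      intro V l hd hn
      simp only [List.foldl]
      have hstep : PySem.Str.replace (String.ofList (pvExpand V l)) (String.ofList [v])
          (String.ofList (List.replicate 5 v)) = String.ofList (pvExpand (V ++ [v]) l) := by
        simp only [PySem.Str.replace]
        rw [String.toList_ofList, String.toList_ofList, String.toList_ofList,
          pvReplaceSingle, pvStepExpand V l v (hd v (by simp))]
      rw [hstep]
      rw [ih (V ++ [v]) l ?_ hn.of_cons]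
      · simp
      · intro x hx
        simp only [List.mem_append, List.mem_singleton]
        rintro (h | rfl)
        · exact hd x (by simp [hx]) h
        · exact (List.nodup_cons.mp hn).1 hx

-- per character, A's if/elif chain is the vowel expansion
theorem pvStepA (acc : String) (c : Char) :
    (if c = 'a' ∨ c = 'e' ∨ c = 'i' ∨ c = 'o' ∨ c = 'u' then acc ++ String.ofList (List.replicate 5 c)
     else if c = 'A' ∨ c = 'E' ∨ c = 'I' ∨ c = 'O' ∨ c = 'U' then acc ++ String.ofList (List.replicate 5 c)
     else acc ++ String.ofList [c])
    = acc ++ String.ofList (if c ∈ "aeiouAEIOU".toList then List.replicate 5 c else [c]) := by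
  have hl : "aeiouAEIOU".toList = ['a','e','i','o','u','A','E','I','O','U'] := by decide
  by_cases hm : c ∈ "aeiouAEIOU".toList
  · rw [if_pos hm]
    rw [hl] at hm
    simp only [List.mem_cons, List.not_mem_nil, or_false] at hm
    rcases hm with h|h|h|h|h|h|h|h|h|h <;> subst h <;> simp
  · rw [if_neg hm]
    rw [hl] at hm
    simp only [List.mem_cons, List.not_mem_nil, or_false] at hm
    push Not at hm
    obtain ⟨h1,h2,h3,h4,h5,h6,h7,h8,h9,h10⟩ := hm
    rw [if_neg (by tauto), if_neg (by tauto)]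

-- A's fold produces the expansion over all ten vowels
theorem pvFoldA (l : List Char) (acc : String) :
    l.foldl (fun newString i =>
      if i = 'a' ∨ i = 'e' ∨ i = 'i' ∨ i = 'o' ∨ i = 'u' then
        newString ++ String.ofList (List.replicate 5 i)
      else if i = 'A' ∨ i = 'E' ∨ i = 'I' ∨ i = 'O' ∨ i = 'U' then
        newString ++ String.ofList (List.replicate 5 i)
      else
        newString ++ String.ofList [i]) acc
    = acc ++ String.ofList (pvExpand "aeiouAEIOU".toList l) := by
  induction l generalizing acc with
  | nil => simp [pvExpand]
  | cons c t ih =>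
      simp only [List.foldl]
      rw [pvStepA acc c]
      rw [ih]
      rw [show pvExpand "aeiouAEIOU".toList (c :: t)
            = (if c ∈ "aeiouAEIOU".toList then List.replicate 5 c else [c]) ++ pvExpand "aeiouAEIOU".toList t from by
          simp [pvExpand, List.flatMap_cons]]
      rw [String.append_assoc, String.ofList_append]

-- ===== VERDICT =====
theorem elongatedVowels_spec : Claim_equal_elongatedVowels := by
  intro s _
  unfold Spec_elongatedVowels elongatedVowels elongatedVowels_alt
  rw [pvFoldA]
  have h1 : String.ofList (pvExpand [] s.toList) = s := by simp [pvExpand]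
  conv_rhs => rw [← h1]
  rw [pvFoldB "aeiouAEIOU".toList [] s.toList (by intro x _; simp) (by decide)]
  simp
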